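-- pv_equiv track=rewrite | github.com/AugustDanell/Kattis-Assignments | Python/palindromicPassword.py | cloesest_palindrome
-- ===== SOURCE A (Python) =====
-- def cloesest_palindrome(n):
--     closest = -1
--     for x1 in range(1,9+1):
--         for x2 in range(0,9+1):
--             for x3 in range(0,9+1):
--                 palindrome = x1 + x2*10 + x3 * 10**2 + x3*10**3 + x2*10**4 + x1*10**5
--                 if closest == -1:
--                     closest = palindrome
--                 else:
--                     dist = abs(palindrome-n)
--                     if dist < abs(closest-n):
--                         closest = palindrome
--     return closest
-- ===== SOURCE B (Python) =====
-- def cloesest_palindrome(n):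
--     # closed-form: mirror the clamped thousands-prefix and its two neighbours,
--     # pick the candidate minimizing (distance, value)
--     p = n // 1000
--     cands = [max(100, min(p - 1, 999)), max(100, min(p, 999)), max(100, min(p + 1, 999))]
--     pals = [(q // 100) * 100001 + (q // 10 % 10) * 10010 + (q % 10) * 1100 for q in cands]
--     return min(pals, key=lambda v: (abs(v - n), v))
-- ===== Notes on version B (the rewrite author's own statement) =====
-- stated objective: alternative
-- what changed: Replaces the exhaustive triple-loop scan over every six-digit palindrome by a closed-form construction: mirror the clamped thousands-prefix and its two neighbours and take the minimum of the three candidates by (distance, value).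
import Mathlib
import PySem

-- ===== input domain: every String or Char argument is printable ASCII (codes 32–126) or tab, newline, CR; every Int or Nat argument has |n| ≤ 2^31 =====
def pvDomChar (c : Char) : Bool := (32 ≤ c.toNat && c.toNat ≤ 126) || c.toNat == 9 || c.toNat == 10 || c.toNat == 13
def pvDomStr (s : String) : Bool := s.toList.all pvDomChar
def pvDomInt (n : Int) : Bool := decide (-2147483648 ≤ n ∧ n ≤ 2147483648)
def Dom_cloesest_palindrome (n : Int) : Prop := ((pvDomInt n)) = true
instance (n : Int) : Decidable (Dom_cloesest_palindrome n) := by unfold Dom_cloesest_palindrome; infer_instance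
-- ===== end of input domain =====

-- B replaces A's scan of all 900 six-digit palindromes by a closed-form construction:
-- mirror the clamped thousands-prefix and its two neighbours and take the min by (distance, value).

-- ===== PORT A =====
def cloesest_palindrome (n : Int) : Int :=
  (PySem.List.pyRange 1 10 1).foldl (fun closest x1 =>
    (PySem.List.pyRange 0 10 1).foldl (fun closest x2 =>
      (PySem.List.pyRange 0 10 1).foldl (fun closest x3 =>
        let palindrome := x1 + x2 * 10 + x3 * 10 ^ 2 + x3 * 10 ^ 3 + x2 * 10 ^ 4 + x1 * 10 ^ 5
        if closest == -1 then palindrome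
        else
          let dist := |palindrome - n|
          if dist < |closest - n| then palindrome else closest) closest) closest) (-1)

-- ===== PORT B =====
def cloesest_palindrome_alt (n : Int) : Int :=
  let p := PySem.Int.floordiv n 1000
  let cands := [max 100 (min (p - 1) 999), max 100 (min p 999), max 100 (min (p + 1) 999)]
  let pals := cands.map (fun q =>
    PySem.Int.floordiv q 100 * 100001 +
    PySem.Int.mod (PySem.Int.floordiv q 10) 10 * 10010 +
    PySem.Int.mod q 10 * 1100)
  -- pals is a 3-element literal list, so Python's min never raises; getD's default is never used
  (PySem.List.min2? pals (fun v => |v - n|) (fun v => v)).getD 0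

-- ===== PRECONDITION & SPEC =====
def Spec_cloesest_palindrome (n : Int) (out : Int) : Prop := out = cloesest_palindrome_alt n
instance (n : Int) (out : Int) : Decidable (Spec_cloesest_palindrome n out) := by unfold Spec_cloesest_palindrome; infer_instance

-- ===== CLAIM (what is proved, stated in full; the proofs are below) =====
def Claim_equal_cloesest_palindrome : Prop := ∀ (n : Int), Dom_cloesest_palindrome n → Spec_cloesest_palindrome n (cloesest_palindrome n)

-- ===== LEMMAS AND PROOFS =====

-- A's loop body (with the -1 sentinel) and the sentinel-free update step
def stepA (n c p : Int) : Int := if c == -1 then p else if |p - n| < |c - n| then p else c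
def stepM (n c p : Int) : Int := if |p - n| < |c - n| then p else c

-- the palindrome built from a 3-digit prefix q
def pal (q : Int) : Int :=
  PySem.Int.floordiv q 100 * 100001 +
  PySem.Int.mod (PySem.Int.floordiv q 10) 10 * 10010 +
  PySem.Int.mod q 10 * 1100

set_option maxRecDepth 100000 in
theorem flat_eq : ((PySem.List.pyRange 100 1000 1).map pal) =
    (PySem.List.pyRange 1 10 1).flatMap (fun x1 =>
      (PySem.List.pyRange 0 10 1).flatMap (fun x2 =>
        (PySem.List.pyRange 0 10 1).map (fun x3 =>
          x1 + x2 * 10 + x3 * 10 ^ 2 + x3 * 10 ^ 3 + x2 * 10 ^ 4 + x1 * 10 ^ 5))) := by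
  decide

theorem A_as_fold (n : Int) :
    cloesest_palindrome n =
      ((PySem.List.pyRange 100 1000 1).map pal).foldl (stepA n) (-1) := by
  rw [flat_eq]
  simp only [List.foldl_flatMap, List.foldl_map]
  rfl

theorem pal_bounds {q : Int} (h1 : 100 ≤ q) (h2 : q ≤ 999) :
    1000 * q + 1 ≤ pal q ∧ pal q ≤ 1000 * q + 999 := by
  unfold pal
  rw [PySem.Int.floordiv_eq_ediv_of_pos (by norm_num), PySem.Int.floordiv_eq_ediv_of_pos (by norm_num),
      PySem.Int.mod_eq_emod_of_pos (by norm_num), PySem.Int.mod_eq_emod_of_pos (by norm_num)]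
  have hbd : q / 100 = q / 10 / 10 := by omega
  rw [hbd]
  omega

theorem pal_mono {a b : Int} (h1 : 100 ≤ a) (h : a < b) (h2 : b ≤ 999) : pal a < pal b := by
  have := pal_bounds h1 (by omega)
  have := pal_bounds (show (100:Int) ≤ b by omega) h2
  omega

theorem pal_mono_le {a b : Int} (h1 : 100 ≤ a) (h : a ≤ b) (h2 : b ≤ 999) : pal a ≤ pal b := by
  rcases eq_or_lt_of_le h with rfl | hlt
  · exact le_refl _
  · exact le_of_lt (pal_mono h1 hlt h2)

theorem foldA_eq_foldM (n : Int) (L : List Int) (hL : ∀ y ∈ L, 0 < y) :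
    ∀ c, c ≠ -1 → L.foldl (stepA n) c = L.foldl (stepM n) c := by
  induction L with
  | nil => intro c _; rfl
  | cons y L ih =>
    intro c hc
    have hy := hL y (List.mem_cons_self ..)
    have h1 : stepA n c y = stepM n c y := by
      simp [stepA, stepM, hc]
    have h2 : stepM n c y ≠ -1 := by
      unfold stepM; split <;> omega
    simp only [List.foldl_cons, h1]
    exact ih (fun z hz => hL z (List.mem_cons_of_mem _ hz)) _ h2

theorem foldM_no_update (n : Int) (L : List Int) :
    ∀ c, (∀ y ∈ L, ¬(|y - n| < |c - n|)) → L.foldl (stepM n) c = c := by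
  induction L with
  | nil => intro c _; rfl
  | cons y L ih =>
    intro c hc
    have h1 : stepM n c y = c := by
      simp [stepM, hc y (List.mem_cons_self ..)]
    simp only [List.foldl_cons, h1]
    exact ih c (fun z hz => hc z (List.mem_cons_of_mem _ hz))

theorem stepM_dist_le (n c p : Int) :
    |stepM n c p - n| ≤ |c - n| ∧ |stepM n c p - n| ≤ |p - n| := by
  unfold stepM; split <;> omega

theorem stepM_self (n c : Int) : stepM n c c = c := by
  simp [stepM]

theorem stepM_absorb (n c y : Int) : stepM n (stepM n c y) y = stepM n c y := by
  unfold stepM; split_ifs <;> omega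

-- decreasing region: while every prefix's palindrome is below n the fold keeps taking the newest
theorem foldM_dec (n : Int) :
    ∀ (k : ℕ) (a : Int), 100 ≤ a - 1 → a - 1 + k ≤ 999 →
      (∀ q, a - 1 ≤ q → q ≤ a - 1 + k → pal q < n) →
      ((PySem.List.pyRange a (a + k) 1).map pal).foldl (stepM n) (pal (a - 1)) = pal (a - 1 + k) := by
  intro k
  induction k with
  | zero =>
    intro a _ _ _
    rw [PySem.List.pyRange_one_eq_nil (by omega)]
    simp
  | succ k ih =>
    intro a ha hk hq
    rw [PySem.List.pyRange_one_cons (by push_cast; omega)]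
    have hstep : stepM n (pal (a - 1)) (pal a) = pal a := by
      have hm : pal (a - 1) < pal a := pal_mono (by omega) (by omega) (by push_cast at hk ⊢; omega)
      have h1 : pal (a - 1) < n := hq (a - 1) (by omega) (by push_cast; omega)
      have h2 : pal a < n := hq a (by omega) (by push_cast; omega)
      unfold stepM; simp only [Int.abs_eq_natAbs]; split <;> omega
    simp only [List.map_cons, List.foldl_cons, hstep]
    have := ih (a + 1) (by omega) (by push_cast at hk ⊢; omega)
      (fun q h1 h2 => hq q (by omega) (by push_cast at h2 ⊢; omega))
    have harg : a + 1 + (k : Int) = a + ((k : ℕ) + 1 : ℕ) := by push_cast; omega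
    have hres : a + 1 - 1 + (k : Int) = a - 1 + ((k : ℕ) + 1 : ℕ) := by push_cast; omega
    rw [harg, hres] at this
    have hacc : pal (a + 1 - 1) = pal a := by norm_num
    rw [hacc] at this
    exact this

-- B evaluates to two chained stepM updates over its three (sorted) candidates
theorem B_as_step (n x y z : Int) (hxy : x ≤ y) (hxz : x ≤ z) (hyz : y ≤ z) :
    (PySem.List.min2? [x, y, z] (fun v => |v - n|) (fun v => v)).getD 0 =
      stepM n (stepM n x y) z := by
  simp only [PySem.List.min2?, List.foldl_cons, List.foldl_nil, Bool.or_eq_true,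
    Bool.and_eq_true, Bool.not_eq_true', decide_eq_true_eq, decide_eq_false_iff_not]
  unfold stepM
  split_ifs <;> simp_all
  all_goals try (split_ifs <;> simp_all)
  all_goals omega

theorem B_closed (n : Int) :
    cloesest_palindrome_alt n =
      stepM n (stepM n (pal (max 100 (min (PySem.Int.floordiv n 1000 - 1) 999)))
                       (pal (max 100 (min (PySem.Int.floordiv n 1000) 999))))
              (pal (max 100 (min (PySem.Int.floordiv n 1000 + 1) 999))) := by
  have h := B_as_step n
    (pal (max 100 (min (PySem.Int.floordiv n 1000 - 1) 999)))
    (pal (max 100 (min (PySem.Int.floordiv n 1000) 999)))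
    (pal (max 100 (min (PySem.Int.floordiv n 1000 + 1) 999)))
    (pal_mono_le (by omega) (by omega) (by omega))
    (pal_mono_le (by omega) (by omega) (by omega))
    (pal_mono_le (by omega) (by omega) (by omega))
  exact h ▸ rfl

-- A reduced to a sentinel-free fold starting at pal 100
theorem A_reduced (n : Int) :
    cloesest_palindrome n =
      ((PySem.List.pyRange 101 1000 1).map pal).foldl (stepM n) (pal 100) := by
  rw [A_as_fold n, PySem.List.pyRange_one_cons (by norm_num)]
  simp only [List.map_cons, List.foldl_cons]
  have h0 : stepA n (-1) (pal 100) = pal 100 := by simp [stepA]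
  rw [h0]
  refine foldA_eq_foldM n _ ?_ _ ?_
  · intro y hy
    rcases List.mem_map.mp hy with ⟨q, hq, rfl⟩
    rcases (PySem.List.mem_pyRange_one).mp hq with ⟨hq1, hq2⟩
    have := pal_bounds (show (100:Int) ≤ q by omega) (by omega)
    omega
  · have := pal_bounds (show (100:Int) ≤ 100 by norm_num) (by norm_num)
    omega

-- tail beyond the bracketing prefixes never updates
theorem tail_no_update (n c a : Int)
    (h : ∀ q, a ≤ q → q ≤ 999 → ¬(|pal q - n| < |c - n|)) :
    ((PySem.List.pyRange a 1000 1).map pal).foldl (stepM n) c = c := by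
  refine foldM_no_update n _ c ?_
  intro y hy
  rcases List.mem_map.mp hy with ⟨q, hq, rfl⟩
  rcases (PySem.List.mem_pyRange_one).mp hq with ⟨hq1, hq2⟩
  exact h q hq1 (by omega)

theorem main_eq (n : Int) : cloesest_palindrome n = cloesest_palindrome_alt n := by
  have hbr : PySem.Int.floordiv n 1000 * 1000 ≤ n ∧ n < (PySem.Int.floordiv n 1000 + 1) * 1000 :=
    (PySem.Int.floordiv_eq_iff_of_pos (by norm_num)).mp rfl
  set p := PySem.Int.floordiv n 1000 with hpdef
  rw [B_closed n, A_reduced n]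
  rw [← hpdef]
  by_cases hp99 : p ≤ 99
  · -- n < 100000: everything clamps to prefix 100
    have hc1 : max 100 (min (p - 1) 999) = 100 := by omega
    have hc2 : max 100 (min p 999) = 100 := by omega
    have hc3 : max 100 (min (p + 1) 999) = 100 := by omega
    rw [hc1, hc2, hc3, stepM_self, stepM_self]
    refine tail_no_update n (pal 100) 101 ?_
    intro q hq1 hq2
    have hb := pal_bounds (show (100:Int) ≤ q by omega) hq2
    have hb0 := pal_bounds (show (100:Int) ≤ 100 by norm_num) (by norm_num)
    simp only [Int.abs_eq_natAbs]
    omega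
  · by_cases hp100 : p = 100
    · -- 100000 ≤ n ≤ 100999: candidates 100, 100, 101
      have hc1 : max 100 (min (p - 1) 999) = 100 := by omega
      have hc2 : max 100 (min p 999) = 100 := by omega
      have hc3 : max 100 (min (p + 1) 999) = 101 := by omega
      rw [hc1, hc2, hc3, stepM_self]
      rw [PySem.List.pyRange_one_cons (by norm_num)]
      simp only [List.map_cons, List.foldl_cons]
      refine tail_no_update n (stepM n (pal 100) (pal 101)) 102 ?_
      intro q hq1 hq2
      have hb := pal_bounds (show (100:Int) ≤ q by omega) hq2
      have hb1 := pal_bounds (show (100:Int) ≤ 101 by norm_num) (by norm_num)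
      have hd := stepM_dist_le n (pal 100) (pal 101)
      have hmono : pal 101 < pal q := pal_mono (by norm_num) (by omega) hq2
      simp only [Int.abs_eq_natAbs] at *
      omega
    · by_cases hp1000 : 1000 ≤ p
      · -- n ≥ 1000000: everything clamps to prefix 999, A walks down the whole list
        have hc1 : max 100 (min (p - 1) 999) = 999 := by omega
        have hc2 : max 100 (min p 999) = 999 := by omega
        have hc3 : max 100 (min (p + 1) 999) = 999 := by omega
        rw [hc1, hc2, hc3, stepM_self, stepM_self]
        have hdec := foldM_dec n 899 101 (by norm_num) (by norm_num) ?_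
        · norm_num at hdec
          exact hdec
        · intro q hq1 hq2
          have hb := pal_bounds (show (100:Int) ≤ q by omega) (by omega)
          omega
      · -- 101 ≤ p ≤ 999: A decreases to pal (p-1) then takes two more steps
        have hp101 : 101 ≤ p := by omega
        have hp999 : p ≤ 999 := by omega
        have hc1 : max 100 (min (p - 1) 999) = p - 1 := by omega
        have hc2 : max 100 (min p 999) = p := by omega
        rw [hc1, hc2]
        -- split the range at p
        rw [PySem.List.pyRange_one_append 101 p 1000 (by omega) (by omega), List.map_append,
          List.foldl_append]
        -- decreasing part
        have hk : (101:Int) + ((p - 101).toNat : Int) = p := by omega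
        have hdec := foldM_dec n (p - 101).toNat 101 (by norm_num) (by omega) ?_
        · rw [hk] at hdec
          have hres : (101:Int) - 1 + ((p - 101).toNat : Int) = p - 1 := by omega
          rw [hres] at hdec
          norm_num at hdec
          rw [hdec]
          by_cases hp998 : p ≤ 998
          · have hc3 : max 100 (min (p + 1) 999) = p + 1 := by omega
            rw [hc3]
            rw [PySem.List.pyRange_one_cons (by omega), PySem.List.pyRange_one_cons (by omega)]
            simp only [List.map_cons, List.foldl_cons]
            refine tail_no_update n _ (p + 1 + 1) ?_
            intro q hq1 hq2
            have hb := pal_bounds (show (100:Int) ≤ q by omega) hq2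
            have hb1 := pal_bounds (show (100:Int) ≤ p + 1 by omega) (by omega)
            have hd := stepM_dist_le n (stepM n (pal (p - 1)) (pal p)) (pal (p + 1))
            have hmono : pal (p + 1) < pal q := pal_mono (by omega) (by omega) hq2
            simp only [Int.abs_eq_natAbs] at *
            omega
          · -- p = 999: candidates 998, 999, 999; the second 999 never updates
            have hp' : p = 999 := by omega
            have hc3 : max 100 (min (p + 1) 999) = 999 := by omega
            rw [hc3, hp']
            rw [PySem.List.pyRange_one_cons (by norm_num), PySem.List.pyRange_one_eq_nil (by norm_num)]
            simp only [List.map_cons, List.map_nil, List.foldl_cons, List.foldl_nil]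
            norm_num
            exact (stepM_absorb n (pal 998) (pal 999)).symm
        · intro q hq1 hq2
          have hq2' : q ≤ p - 1 := by omega
          have hb := pal_bounds (show (100:Int) ≤ q by omega) (by omega)
          omega

-- ===== VERDICT (by name: the statement is the Claim_ definition above) =====
set_option maxRecDepth 10000 in
theorem cloesest_palindrome_spec : Claim_equal_cloesest_palindrome := by
  intro n _
  unfold Spec_cloesest_palindrome
  exact main_eq n
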